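-- pv_equiv track=rewrite | github.com/IndrasNet108/decirepo | oracle/decirepo_oracle_v0_1.py | check_transition_chain_continuity
-- ===== SOURCE A (Python) =====
-- from typing import Any, Dict, Iterable, List, Tuple
--
-- def check_transition_chain_continuity(value: Any) -> bool:
--     if not isinstance(value, list):
--         return False
--     prev_to = None
--     for step in value:
--         if not isinstance(step, dict):
--             return False
--         if prev_to is not None and prev_to != step.get("from"):
--             return False
--         prev_to = step.get("to")
--     return True
-- ===== SOURCE B (Python) =====
-- def check_transition_chain_continuity(value):
--     if not isinstance(value, list):
--         return False
--     return _valid_chain(value)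
--
--
-- def _valid_chain(steps):
--     # structural recursion: validate the whole suffix first, then the link
--     # between the head step and the first step of the suffix
--     if not steps:
--         return True
--     head = steps[0]
--     rest = steps[1:]
--     if not isinstance(head, dict):
--         return False
--     if not _valid_chain(rest):
--         return False
--     if not rest:
--         return True
--     t = head.get("to")
--     return t is None or t == rest[0].get("from")
-- ===== Notes on version B (the rewrite author's own statement) =====
-- stated objective: alternative
-- what changed: Replaces A's iterative fused loop carrying a prev_to accumulator with early returns by a pure structural recursion on the list that validates the entire suffix first (back-to-front) and then checks the link between the head and the first element of the suffix, with no carried state.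
import Mathlib
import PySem

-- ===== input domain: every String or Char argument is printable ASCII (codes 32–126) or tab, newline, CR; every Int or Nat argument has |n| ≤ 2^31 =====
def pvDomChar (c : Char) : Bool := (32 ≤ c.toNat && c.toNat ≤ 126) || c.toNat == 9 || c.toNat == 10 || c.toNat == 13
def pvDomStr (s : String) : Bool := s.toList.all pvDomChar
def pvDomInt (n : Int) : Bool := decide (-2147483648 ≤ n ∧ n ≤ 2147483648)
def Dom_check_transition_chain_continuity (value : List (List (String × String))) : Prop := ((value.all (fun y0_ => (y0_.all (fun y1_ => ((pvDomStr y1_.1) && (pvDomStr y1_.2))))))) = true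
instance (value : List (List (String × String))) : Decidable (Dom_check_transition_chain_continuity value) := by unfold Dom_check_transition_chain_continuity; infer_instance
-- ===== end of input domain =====

-- B replaces A's stateful accumulator loop by a stateless structural recursion that
-- validates the suffix first and then the head link; objective: alternative decomposition.


-- ===== PORT A =====
-- A's loop: carries prev_to (None initially) over the steps, returns False early
-- when prev_to is set and differs from step.get("from"); isinstance checks are
-- trivially true under the type convention.
def pvChainLoopA : Option String → List (List (String × String)) → Bool
  | _, [] => true
  | prev_to, step :: rest =>
    if prev_to ≠ none ∧ prev_to ≠ (PySem.Dict.mk step).get? "from" then false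
    else pvChainLoopA ((PySem.Dict.mk step).get? "to") rest

def check_transition_chain_continuity (value : List (List (String × String))) : Bool :=
  pvChainLoopA none value

-- ===== PORT B =====
-- B's _valid_chain: structural recursion, suffix validated first, then the head link.
def pvValidChain : List (List (String × String)) → Bool
  | [] => true
  | head :: rest =>
    -- isinstance(head, dict) is trivially true under the type convention
    if ¬ pvValidChain rest then false
    else
      match rest with
      | [] => true
      | nxt :: _ =>
        let t := (PySem.Dict.mk head).get? "to"
        t == none || t == (PySem.Dict.mk nxt).get? "from"

def check_transition_chain_continuity_alt (value : List (List (String × String))) : Bool :=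
  pvValidChain value

-- ===== PRECONDITION & SPEC =====
def Spec_check_transition_chain_continuity (value : List (List (String × String))) (out : Bool) : Prop := out = check_transition_chain_continuity_alt value
instance (value : List (List (String × String))) (out : Bool) : Decidable (Spec_check_transition_chain_continuity value out) := by unfold Spec_check_transition_chain_continuity; infer_instance

-- ===== CLAIM (what is proved, stated in full; the proofs are below) =====
def Claim_equal_check_transition_chain_continuity : Prop := ∀ (value : List (List (String × String))), Dom_check_transition_chain_continuity value → Spec_check_transition_chain_continuity value (check_transition_chain_continuity value)

-- ===== LEMMAS AND PROOFS =====
-- The head-link check that B performs between a "virtual previous to" p and a list l.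
def pvHeadCheck (p : Option String) : List (List (String × String)) → Bool
  | [] => true
  | step :: _ => (p == none) || (p == (PySem.Dict.mk step).get? "from")

-- Unfolding B's recursion one step: validate the suffix, then the head link.
lemma pvValidChain_cons (step : List (String × String)) (rest : List (List (String × String))) :
    pvValidChain (step :: rest) =
      (pvValidChain rest && pvHeadCheck ((PySem.Dict.mk step).get? "to") rest) := by
  rw [pvValidChain.eq_def]
  by_cases hv : pvValidChain rest
  · cases rest <;> simp [pvHeadCheck, hv]
  · simp only [Bool.not_eq_true] at hv; simp [hv]

-- A's loop with accumulator p equals the head check for p conjoined with B's recursion.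
lemma pvChainLoopA_eq_headCheck_validChain (l : List (List (String × String))) :
    ∀ p : Option String, pvChainLoopA p l = (pvHeadCheck p l && pvValidChain l) := by
  induction l with
  | nil => intro p; simp [pvChainLoopA, pvHeadCheck, pvValidChain]
  | cons step rest ih =>
    intro p
    rw [pvChainLoopA]
    by_cases h : p ≠ none ∧ p ≠ (PySem.Dict.mk step).get? "from"
    · simp only [if_pos h]
      obtain ⟨h1, h2⟩ := h
      simp [pvHeadCheck, h1, h2]
    · simp only [if_neg h]
      push Not at h
      rw [ih, pvValidChain_cons]
      by_cases hp : p = none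
      · cases rest <;> simp [pvHeadCheck, hp, Bool.and_comm]
      · have hf := h hp
        cases rest <;> simp [pvHeadCheck, hf, Bool.and_comm]

-- ===== VERDICT (by name: the statement is the Claim_ definition above) =====
theorem check_transition_chain_continuity_spec : Claim_equal_check_transition_chain_continuity := by
  intro value _
  unfold Spec_check_transition_chain_continuity check_transition_chain_continuity
    check_transition_chain_continuity_alt
  rw [pvChainLoopA_eq_headCheck_validChain]
  cases value <;> simp [pvHeadCheck]
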